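-- pv_equiv track=rewrite | github.com/AlexeyBudyak/CodeWars | python-kata-6kyu/last-survivors-ep-3.py | last_survivors
-- ===== SOURCE A (Python) =====
-- def last_survivors(arr, nums):
--     result = ''
--     nums = nums[:len(arr[0])]
--     matrix = []
--     for x in arr:
--         matrix.append(list(x))
--     for i in range(len(nums)):
--         if nums[i] > 0:
--             for j in range(len(arr)-1,-1,-1):
--                 if matrix[j][i] != ' ':
--                     matrix[j][i] = ' '
--                     nums[i]-= 1
--                     if nums[i] == 0: break
--     for lines in matrix:
--         for el in lines:
--             if el != ' ':
--                 result+= el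
--     return result
-- ===== SOURCE B (Python) =====
-- def last_survivors(arr, nums):
--     # count pass + budgeted forward scan instead of bottom-up per-column mutation
--     width = len(arr[0])
--     L = min(len(nums), width)
--     maxlen = max(len(row) for row in arr)
--     cnt = [0] * maxlen
--     for row in arr:
--         for i, ch in enumerate(row):
--             if ch != ' ':
--                 cnt[i] += 1
--     survive = []
--     for i in range(maxlen):
--         if i < L:
--             survive.append(cnt[i] - min(cnt[i], max(0, nums[i])))
--         else:
--             survive.append(cnt[i])
--     seen = [0] * maxlen
--     out = []
--     for row in arr:
--         for i, ch in enumerate(row):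
--             if ch != ' ':
--                 if seen[i] < survive[i]:
--                     out.append(ch)
--                 seen[i] += 1
--     return ''.join(out)
-- ===== Notes on version B (the rewrite author's own statement) =====
-- stated objective: alternative
-- what changed: Replaces A's bottom-up per-column matrix mutation (nested loops blanking cells and re-reading the matrix) with a counting pass computing per-column non-space totals, a per-column survivor budget, and one budgeted forward row-major scan that emits each column's top chars directly.
import Mathlib
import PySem

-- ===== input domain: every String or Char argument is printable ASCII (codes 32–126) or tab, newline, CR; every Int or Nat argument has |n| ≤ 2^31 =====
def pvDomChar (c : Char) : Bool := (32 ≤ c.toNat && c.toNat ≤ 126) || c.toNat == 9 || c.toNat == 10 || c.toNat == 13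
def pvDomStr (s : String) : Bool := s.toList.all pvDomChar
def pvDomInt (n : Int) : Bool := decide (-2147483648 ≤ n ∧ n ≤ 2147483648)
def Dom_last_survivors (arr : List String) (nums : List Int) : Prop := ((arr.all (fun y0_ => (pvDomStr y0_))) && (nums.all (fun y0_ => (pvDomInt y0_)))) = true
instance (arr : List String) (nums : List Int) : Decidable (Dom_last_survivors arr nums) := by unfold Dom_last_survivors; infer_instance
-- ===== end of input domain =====

-- B replaces A's bottom-up per-column matrix mutation with a per-column count pass,
-- a survivor budget, and one budgeted forward row-major scan (same cost, different decomposition).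

-- ===== PORT A =====
-- inner loop 'for j in range(len(arr)-1,-1,-1): …' of A, for column i; the `none`
-- branch is where Python raises IndexError (matrix[j][i] on a short row) — excluded by Pre_.
def pvA_runCol (i : Nat) : Nat → Int → List (List Char) → List (List Char)
  | 0, _, mat => mat
  | j+1, n, mat =>
    match (mat.getD j [])[i]? with
    | none => mat
    | some c =>
      if c ≠ ' ' then
        let mat' := mat.set j ((mat.getD j []).set i ' ')
        if n - 1 = 0 then mat' else pvA_runCol i j (n-1) mat'
      else pvA_runCol i j n mat

def last_survivors (arr : List String) (nums : List Int) : String :=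
  -- arr[0] raises IndexError on empty arr: excluded by Pre_ (headD is only a totalizer)
  let nums2 := nums.take (arr.headD "").toList.length
  let mat := arr.map String.toList
  let mat2 := (List.range nums2.length).foldl
      (fun m i => if nums2.getD i 0 > 0 then pvA_runCol i m.length (nums2.getD i 0) m else m) mat
  String.ofList (mat2.foldl (fun res line => res ++ line.filter (fun el => el ≠ ' ')) [])

-- ===== PORT B =====
-- 'for i, ch in enumerate(row): if ch != " ": cnt[i] += 1'
def pvB_bump (c : List Nat) (r : List Char) : List Nat :=
  (PySem.List.enumerate r 0).foldl
    (fun c p => if p.2 ≠ ' ' then c.set p.1.toNat (c.getD p.1.toNat 0 + 1) else c) c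

def last_survivors_alt (arr : List String) (nums : List Int) : String :=
  -- len(arr[0]) raises IndexError on empty arr (so does max() below): excluded by Pre_
  let width := (arr.headD "").toList.length
  let L := min nums.length width
  let rows := arr.map String.toList
  let maxlen := rows.foldl (fun m r => max m r.length) 0
  let cnt := rows.foldl pvB_bump (List.replicate maxlen 0)
  let survive := (List.range maxlen).map (fun i =>
      if i < L then cnt.getD i 0 - min (cnt.getD i 0) (max 0 (nums.getD i 0)).toNat
      else cnt.getD i 0)
  let fin := rows.foldl (fun (st : List Nat × List Char) r =>
      (PySem.List.enumerate r 0).foldl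
        (fun st p =>
          if p.2 ≠ ' ' then
            (st.1.set p.1.toNat (st.1.getD p.1.toNat 0 + 1),
             if st.1.getD p.1.toNat 0 < survive.getD p.1.toNat 0 then st.2 ++ [p.2] else st.2)
          else st)
        st)
      ((List.replicate maxlen 0 : List Nat), ([] : List Char))
  String.ofList fin.2

-- ===== PRECONDITION & SPEC =====
-- number of rows of arr whose character at column i exists and is not a space
def pvColCnt (arr : List String) (i : Nat) : Nat :=
  arr.countP (fun s => s.toList.getD i ' ' ≠ ' ')

-- Pre_ excludes exactly the inputs where A raises IndexError: the empty arr (arr[0]),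
-- and ragged inputs where some column loop reaches a row shorter than the column
-- before its removal budget is exhausted (matrix[j][i] out of range).
def Pre_last_survivors (arr : List String) (nums : List Int) : Prop :=
  arr ≠ [] ∧
  ∀ i < min nums.length (arr.headD "").toList.length, nums.getD i 0 > 0 →
    ∀ j < arr.length, (arr.getD j "").toList.length ≤ i →
      nums.getD i 0 ≤ (pvColCnt (arr.drop (j+1)) i : Int)

instance (arr : List String) (nums : List Int) : Decidable (Pre_last_survivors arr nums) := by
  unfold Pre_last_survivors; infer_instance

def pvWitness_last_survivors : List String × List Int := (["ab", "cd"], [1, 0])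

def Spec_last_survivors (arr : List String) (nums : List Int) (out : String) : Prop := out = last_survivors_alt arr nums
instance (arr : List String) (nums : List Int) (out : String) : Decidable (Spec_last_survivors arr nums out) := by unfold Spec_last_survivors; infer_instance

-- ===== CLAIM (what is proved, stated in full; the proofs are below) =====
def Claim_equal_last_survivors : Prop := ∀ (arr : List String) (nums : List Int), Dom_last_survivors arr nums → Pre_last_survivors arr nums → Spec_last_survivors arr nums (last_survivors arr nums)

-- ===== LEMMAS AND PROOFS =====

-- ---------- proof-side helpers ----------

-- non-space test at column i of a row / column count over rows
def pvNsp (r : List Char) (i : Nat) : Bool := decide (r.getD i ' ' ≠ ' ')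
def pvCnt (rows : List (List Char)) (i : Nat) : Nat := rows.countP (fun r => pvNsp r i)

-- pure bottom-up blanking pass: result rows, remaining budget, broke/raised flag
def pvBB (i : Nat) (n : Int) : List (List Char) → List (List Char) × Int × Bool
  | [] => ([], n, false)
  | r :: rest =>
    let p := pvBB i n rest
    if p.2.2 then (r :: p.1, p.2.1, true)
    else match r[i]? with
      | none => (r :: p.1, p.2.1, true)
      | some c =>
        if c ≠ ' ' then (r.set i ' ' :: p.1, p.2.1 - 1, decide (p.2.1 - 1 = 0))
        else (r :: p.1, p.2.1, false)

-- declarative description of one column pass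
def pvBlank (i : Nat) (n : Int) : List (List Char) → List (List Char)
  | [] => []
  | r :: rest => (if pvNsp r i ∧ (pvCnt rest i : Int) < n then r.set i ' ' else r) :: pvBlank i n rest

-- declarative description of the matrix after the first k columns were processed
def pvRowT (k : Nat) (nums2 : List Int) (rest : List (List Char)) : List Char → Nat → List Char
  | [], _ => []
  | c :: cs, m =>
    (if m < k ∧ c ≠ ' ' ∧ (pvCnt rest m : Int) < max 0 (nums2.getD m 0) then ' ' else c) ::
      pvRowT k nums2 rest cs (m + 1)

def pvRef (k : Nat) (nums2 : List Int) : List (List Char) → List (List Char)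
  | [] => []
  | r :: rest => pvRowT k nums2 rest r 0 :: pvRef k nums2 rest

-- B-side declarative loops
def pvBump : List Char → Nat → List Nat → List Nat
  | [], _, c => c
  | ch :: cs, k, c => pvBump cs (k + 1) (if ch ≠ ' ' then c.set k (c.getD k 0 + 1) else c)

def pvKept (sur : List Nat) : List Char → Nat → List Nat → List Char
  | [], _, _ => []
  | ch :: cs, k, seen =>
    (if ch ≠ ' ' ∧ seen.getD k 0 < sur.getD k 0 then [ch] else []) ++
      pvKept sur cs (k + 1) (if ch ≠ ' ' then seen.set k (seen.getD k 0 + 1) else seen)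

def pvKeep (sur seen : List Nat) : List Char → Nat → List Char
  | [], _ => []
  | ch :: cs, k =>
    (if ch ≠ ' ' ∧ seen.getD k 0 < sur.getD k 0 then [ch] else []) ++ pvKeep sur seen cs (k + 1)

def pvK (sur : List Nat) : List (List Char) → List Nat → List Char
  | [], _ => []
  | r :: rest, seen => pvKeep sur seen r 0 ++ pvK sur rest (pvBump r 0 seen)

-- ---------- A side ----------

lemma pvBB_append (i : Nat) (n : Int) (xs ys : List (List Char)) :
    pvBB i n (xs ++ ys) =
      (if (pvBB i n ys).2.2 then (xs ++ (pvBB i n ys).1, (pvBB i n ys).2.1, true)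
       else ((pvBB i (pvBB i n ys).2.1 xs).1 ++ (pvBB i n ys).1,
             (pvBB i (pvBB i n ys).2.1 xs).2.1, (pvBB i (pvBB i n ys).2.1 xs).2.2)) := by
  induction xs with
  | nil =>
    rcases hys : pvBB i n ys with ⟨ys1, n1, b1⟩
    cases b1 <;> simp [pvBB, hys]
  | cons x xs ih =>
    rcases hys : pvBB i n ys with ⟨ys1, n1, b1⟩
    rw [hys] at ih
    cases b1 with
    | true =>
      simp only [List.cons_append, pvBB, ih, hys]
      simp
    | false =>
      simp only [List.cons_append, pvBB, ih, hys]
      rcases hxs : pvBB i n1 xs with ⟨xs1, n2, b2⟩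
      cases b2 with
      | true => simp [pvBB, hxs]
      | false =>
        cases hx : x[i]? with
        | none => simp [pvBB, hxs, hx]
        | some c =>
          by_cases hc : c = ' ' <;> simp [pvBB, hxs, hx, hc]

lemma pvA_runCol_eq (i : Nat) (n : Int) (pre suf : List (List Char)) :
    pvA_runCol i pre.length n (pre ++ suf) = (pvBB i n pre).1 ++ suf := by
  induction pre using List.reverseRecOn generalizing suf n with
  | nil => simp [pvA_runCol, pvBB]
  | append_singleton xs r ih =>
    have hlen : (xs ++ [r]).length = xs.length + 1 := by simp
    rw [hlen, List.append_assoc]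
    have hget : (xs ++ ([r] ++ suf)).getD xs.length [] = r := by
      rw [List.getD_eq_getElem?_getD, List.getElem?_append_right (by omega)]
      simp
    have hset : ∀ v, (xs ++ ([r] ++ suf)).set xs.length v = xs ++ ([v] ++ suf) := by
      intro v
      rw [List.set_append_right _ _ (by omega)]
      simp
    rw [pvA_runCol, hget]
    cases hr : r[i]? with
    | none =>
      rw [pvBB_append]
      simp [pvBB, hr]
    | some c =>
      dsimp only
      by_cases hc : c = ' '
      · subst hc
        rw [if_neg (by simp), ih, pvBB_append]
        simp [pvBB, hr]
      · rw [if_pos hc, hset]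
        by_cases hz : n - 1 = 0
        · rw [if_pos hz, pvBB_append]
          simp [pvBB, hr, hc, hz]
        · rw [if_neg hz, ih, pvBB_append]
          simp [pvBB, hr, hc, hz]

lemma pvBB_spec (i : Nat) (n : Int) (rows : List (List Char)) (hn : 0 < n)
    (hs : ∀ j, (hj : j < rows.length) → rows[j].length ≤ i → n ≤ (pvCnt (rows.drop (j + 1)) i : Int)) :
    pvBB i n rows = (pvBlank i n rows, n - min n (pvCnt rows i), decide ((n : Int) ≤ (pvCnt rows i : Int))) := by
  induction rows with
  | nil =>
    have hc0 : pvCnt ([] : List (List Char)) i = 0 := rfl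
    rw [show pvBB i n ([] : List (List Char)) = ([], n, false) from rfl,
        show pvBlank i n ([] : List (List Char)) = [] from rfl, hc0]
    have hdec : decide ((n:Int) ≤ ((0:Nat):Int)) = false := by
      simp only [decide_eq_false_iff_not]
      omega
    have hmin : (n:Int) - min n ((0:Nat):Int) = n := by omega
    rw [hdec, hmin]
  | cons r rest ih =>
    have hs' : ∀ j, (hj : j < rest.length) → rest[j].length ≤ i →
        n ≤ (pvCnt (rest.drop (j + 1)) i : Int) := by
      intro j hj hshort
      have := hs (j + 1) (by simpa using Nat.succ_lt_succ hj) (by simpa using hshort)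
      simpa using this
    rw [pvBB, ih hs']
    simp only []
    by_cases hb : (n : Int) ≤ (pvCnt rest i : Int)
    · rw [if_pos (by simpa using hb)]
      have hcond : ¬ (pvNsp r i = true ∧ ((pvCnt rest i : Int) < n)) := by
        intro hcon
        omega
      have hcnt : (pvCnt (r :: rest) i : Int) = (if pvNsp r i = true then 1 else 0) + (pvCnt rest i : Int) := by
        simp only [pvCnt, List.countP_cons]
        split_ifs <;> simp_all <;> omega
      simp only [pvBlank, Prod.mk.injEq]
      refine ⟨by rw [if_neg hcond], ?_, ?_⟩
      · split_ifs at hcnt <;> omega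
      · symm
        simp only [decide_eq_true_iff]
        split_ifs at hcnt <;> omega
    · rw [if_neg (by simpa using hb)]
      cases hr : r[i]? with
      | none =>
        exfalso
        have hshort : r.length ≤ i := by
          have := List.getElem?_eq_none_iff.mp hr
          omega
        have := hs 0 (by simp) (by simpa using hshort)
        simp at this
        omega
      | some c =>
        have hgetD : r.getD i ' ' = c := by
          simp [List.getD_eq_getElem?_getD, hr]
        dsimp only
        by_cases hc : c = ' '
        · subst hc
          have hnsp : pvNsp r i = false := by simp [pvNsp, hr]
          have hcnt : pvCnt (r :: rest) i = pvCnt rest i := by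
            simp [pvCnt, List.countP_cons, hnsp]
          rw [if_neg (by simp)]
          simp only [pvBlank, hcnt, Prod.mk.injEq]
          refine ⟨by rw [if_neg (by simp [hnsp])], trivial, (decide_eq_false hb).symm⟩
        · have hnsp : pvNsp r i = true := by simp [pvNsp, hr, hc]
          have hcnt : pvCnt (r :: rest) i = pvCnt rest i + 1 := by
            simp [pvCnt, List.countP_cons, hnsp]
          rw [if_pos hc]
          simp only [pvBlank, hcnt, Prod.mk.injEq]
          refine ⟨by rw [if_pos ⟨hnsp, by omega⟩], by push_cast; omega, ?_⟩
          simp only [decide_eq_decide]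
          push_cast
          omega

lemma length_pvRowT (k : Nat) (nums2 : List Int) (rest : List (List Char)) (r : List Char) (m : Nat) :
    (pvRowT k nums2 rest r m).length = r.length := by
  induction r generalizing m with
  | nil => simp [pvRowT]
  | cons c cs ih => simp [pvRowT, ih]

lemma getElem?_pvRowT (k : Nat) (nums2 : List Int) (rest : List (List Char)) (r : List Char) (m q : Nat) :
    (pvRowT k nums2 rest r m)[q]? =
      (r[q]?).map (fun c =>
        if m + q < k ∧ c ≠ ' ' ∧ (pvCnt rest (m + q) : Int) < max 0 (nums2.getD (m + q) 0) then ' ' else c) := by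
  induction r generalizing m q with
  | nil => simp [pvRowT]
  | cons c cs ih =>
    cases q with
    | zero => simp [pvRowT]
    | succ q =>
      have h1 : (pvRowT k nums2 rest (c :: cs) m)[q + 1]? = (pvRowT k nums2 rest cs (m + 1))[q]? := rfl
      have h2 : (c :: cs)[q + 1]? = cs[q]? := rfl
      rw [h1, h2, ih (m + 1) q]
      have hidx : m + 1 + q = m + (q + 1) := by omega
      rw [hidx]

lemma pvRef_zero (nums2 : List Int) (rows : List (List Char)) : pvRef 0 nums2 rows = rows := by
  induction rows with
  | nil => rfl
  | cons r rest ih =>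
    have hrow : pvRowT 0 nums2 rest r 0 = r := by
      apply List.ext_getElem?
      intro q
      rw [getElem?_pvRowT]
      cases hq : r[q]? with
      | none => rfl
      | some c => simp
    simp [pvRef, hrow, ih]

lemma length_pvRef (k : Nat) (nums2 : List Int) (rows : List (List Char)) :
    (pvRef k nums2 rows).length = rows.length := by
  induction rows with
  | nil => rfl
  | cons r rest ih => simp [pvRef, ih]

lemma drop_pvRef (k : Nat) (nums2 : List Int) (rows : List (List Char)) (m : Nat) :
    (pvRef k nums2 rows).drop m = pvRef k nums2 (rows.drop m) := by
  induction rows generalizing m with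
  | nil => simp [pvRef]
  | cons r rest ih =>
    cases m with
    | zero => rfl
    | succ m => simpa [pvRef] using ih m

lemma getElem_length_pvRef (k : Nat) (nums2 : List Int) (rows : List (List Char)) (j : Nat)
    (hj : j < (pvRef k nums2 rows).length) (hj' : j < rows.length) :
    (pvRef k nums2 rows)[j].length = rows[j].length := by
  induction rows generalizing j with
  | nil => simp at hj'
  | cons r rest ih =>
    cases j with
    | zero => simpa [pvRef] using length_pvRowT k nums2 rest r 0
    | succ j =>
      simp only [pvRef] at hj ⊢
      exact ih j (by simpa using hj) (by simpa using hj')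

-- column q ≥ k is untouched by pvRef k
lemma pvNsp_pvRowT_ge (k : Nat) (nums2 : List Int) (rest : List (List Char)) (r : List Char) (q : Nat)
    (h : k ≤ q) : pvNsp (pvRowT k nums2 rest r 0) q = pvNsp r q := by
  have h0 : (pvRowT k nums2 rest r 0).getD q ' ' = r.getD q ' ' := by
    rw [List.getD_eq_getElem?_getD, List.getD_eq_getElem?_getD, getElem?_pvRowT]
    cases hq : r[q]? with
    | none => rfl
    | some c =>
      simp only [Option.getD_some, Option.map_some]
      have hno : ¬ (0 + q < k ∧ c ≠ ' ' ∧ (pvCnt rest (0 + q) : Int) < max 0 (nums2.getD (0 + q) 0)) := by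
        intro hcon
        omega
      rw [if_neg hno]
  unfold pvNsp
  rw [h0]

lemma pvCnt_pvRef_ge (k : Nat) (nums2 : List Int) (rows : List (List Char)) (q : Nat) (h : k ≤ q) :
    pvCnt (pvRef k nums2 rows) q = pvCnt rows q := by
  induction rows with
  | nil => rfl
  | cons r rest ih =>
    simp only [pvRef, pvCnt, List.countP_cons] at *
    rw [pvNsp_pvRowT_ge k nums2 rest r q h, ih]

-- one processed column advances the reference matrix
lemma pvBlank_pvRef (k : Nat) (nums2 : List Int) (rows : List (List Char))
    (hpos : 0 < nums2.getD k 0) :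
    pvBlank k (nums2.getD k 0) (pvRef k nums2 rows) = pvRef (k + 1) nums2 rows := by
  induction rows with
  | nil => rfl
  | cons r rest ih =>
    rw [show pvRef k nums2 (r :: rest) = pvRowT k nums2 rest r 0 :: pvRef k nums2 rest from rfl]
    rw [pvBlank, ih]
    rw [pvNsp_pvRowT_ge k nums2 rest r k (le_refl k), pvCnt_pvRef_ge k nums2 rest k (le_refl k)]
    rw [show pvRef (k + 1) nums2 (r :: rest) = pvRowT (k + 1) nums2 rest r 0 :: pvRef (k + 1) nums2 rest from rfl]
    congr 1
    by_cases hcond : pvNsp r k = true ∧ ((pvCnt rest k : Int) < nums2.getD k 0)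
    · rw [if_pos hcond]
      apply List.ext_getElem?
      intro q
      rw [List.getElem?_set, getElem?_pvRowT, length_pvRowT]
      by_cases hq : k = q
      · subst hq
        have hk' : k < r.length := by
          by_contra hge
          have hnone : r[k]? = none := List.getElem?_eq_none_iff.mpr (by omega)
          simp [pvNsp, List.getD_eq_getElem?_getD, hnone] at hcond
        have hc : r[k]? = some (r.getD k ' ') := by
          rw [List.getD_eq_getElem?_getD, List.getElem?_eq_getElem hk']
          rfl
        have hif : (0 + k < k + 1 ∧ r.getD k ' ' ≠ ' ' ∧ (pvCnt rest (0 + k) : Int) < max 0 (nums2.getD (0 + k) 0)) := by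
          refine ⟨by omega, by simpa [pvNsp] using hcond.1, ?_⟩
          simp only [Nat.zero_add]
          omega
        rw [if_pos rfl, if_pos hk', getElem?_pvRowT, hc]
        simp only [Option.map_some, Option.some.injEq]
        rw [if_pos hif]
      · rw [if_neg hq, getElem?_pvRowT]
        cases hrq : r[q]? with
        | none => rfl
        | some c =>
          simp only [Option.map_some, Option.some.injEq]
          by_cases h1 : 0 + q < k ∧ c ≠ ' ' ∧ (pvCnt rest (0 + q) : Int) < max 0 (nums2.getD (0 + q) 0)
          · rw [if_pos h1, if_pos ⟨by omega, h1.2⟩]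
          · rw [if_neg h1, if_neg ?_]
            intro hcon
            exact h1 ⟨by omega, hcon.2⟩
    · rw [if_neg hcond]
      apply List.ext_getElem?
      intro q
      rw [getElem?_pvRowT, getElem?_pvRowT]
      cases hrq : r[q]? with
      | none => rfl
      | some c =>
        simp only [Option.map_some, Option.some.injEq]
        by_cases h1 : 0 + q < k ∧ c ≠ ' ' ∧ (pvCnt rest (0 + q) : Int) < max 0 (nums2.getD (0 + q) 0)
        · rw [if_pos h1, if_pos ⟨by omega, h1.2⟩]
        · rw [if_neg h1, if_neg ?_]
          intro hcon
          rcases Nat.lt_succ_iff_lt_or_eq.mp hcon.1 with h | h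
          · exact h1 ⟨h, hcon.2⟩
          · exfalso
            have hq2 : q = k := by omega
            subst hq2
            apply hcond
            refine ⟨by simp [pvNsp, List.getD_eq_getElem?_getD, hrq, hcon.2.1], ?_⟩
            have h22 := hcon.2.2
            simp only [Nat.zero_add] at h22
            omega

lemma pvRef_succ_skip (k : Nat) (nums2 : List Int) (rows : List (List Char))
    (hnp : nums2.getD k 0 ≤ 0) :
    pvRef (k + 1) nums2 rows = pvRef k nums2 rows := by
  induction rows with
  | nil => rfl
  | cons r rest ih =>
    rw [show pvRef (k + 1) nums2 (r :: rest) = pvRowT (k + 1) nums2 rest r 0 :: pvRef (k + 1) nums2 rest from rfl]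
    rw [show pvRef k nums2 (r :: rest) = pvRowT k nums2 rest r 0 :: pvRef k nums2 rest from rfl]
    rw [ih]
    congr 1
    apply List.ext_getElem?
    intro q
    rw [getElem?_pvRowT, getElem?_pvRowT]
    cases hrq : r[q]? with
    | none => rfl
    | some c =>
      simp only [Option.map_some, Option.some.injEq]
      by_cases h1 : 0 + q < k ∧ c ≠ ' ' ∧ (pvCnt rest (0 + q) : Int) < max 0 (nums2.getD (0 + q) 0)
      · rw [if_pos ⟨by omega, h1.2⟩, if_pos h1]
      · rw [if_neg ?_, if_neg h1]
        intro hcon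
        rcases Nat.lt_succ_iff_lt_or_eq.mp hcon.1 with h | h
        · exact h1 ⟨h, hcon.2⟩
        · have h22 := hcon.2.2
          rw [h] at h22
          omega

lemma pvA_fold (rows : List (List Char)) (nums2 : List Int)
    (hs : ∀ k, k < nums2.length → nums2.getD k 0 > 0 →
      ∀ j, (hj : j < rows.length) → rows[j].length ≤ k → nums2.getD k 0 ≤ (pvCnt (rows.drop (j + 1)) k : Int)) :
    ∀ k, k ≤ nums2.length →
      (List.range k).foldl
        (fun m i => if nums2.getD i 0 > 0 then pvA_runCol i m.length (nums2.getD i 0) m else m) rows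
      = pvRef k nums2 rows := by
  intro k
  induction k with
  | zero =>
    intro _
    rw [List.range_zero, List.foldl_nil, pvRef_zero]
  | succ k ih =>
    intro hk
    rw [List.range_succ, List.foldl_append, ih (by omega), List.foldl_cons, List.foldl_nil]
    by_cases hp : nums2.getD k 0 > 0
    · rw [if_pos hp]
      have heq := pvA_runCol_eq k (nums2.getD k 0) (pvRef k nums2 rows) []
      rw [List.append_nil, List.append_nil] at heq
      rw [heq]
      have hsM : ∀ j, (hj : j < (pvRef k nums2 rows).length) → (pvRef k nums2 rows)[j].length ≤ k →
          nums2.getD k 0 ≤ (pvCnt ((pvRef k nums2 rows).drop (j + 1)) k : Int) := by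
        intro j hj hshort
        have hj' : j < rows.length := by
          have := length_pvRef k nums2 rows
          omega
        rw [getElem_length_pvRef k nums2 rows j hj hj'] at hshort
        rw [drop_pvRef, pvCnt_pvRef_ge k nums2 (rows.drop (j + 1)) k (le_refl k)]
        exact hs k (by omega) hp j hj' hshort
      rw [pvBB_spec k (nums2.getD k 0) (pvRef k nums2 rows) hp hsM]
      exact pvBlank_pvRef k nums2 rows hp
    · rw [if_neg hp, pvRef_succ_skip k nums2 rows (by omega)]

-- ---------- B side ----------

lemma pv_getD_set_ne (c : List Nat) (k q v : Nat) (h : k ≠ q) :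
    (c.set k v).getD q 0 = c.getD q 0 := by
  rw [List.getD_eq_getElem?_getD, List.getD_eq_getElem?_getD, List.getElem?_set, if_neg h]

lemma pv_getD_set_eq (c : List Nat) (k v : Nat) (h : k < c.length) :
    (c.set k v).getD k 0 = v := by
  rw [List.getD_eq_getElem?_getD, List.getElem?_set, if_pos rfl, if_pos h]
  rfl

lemma pvNsp_cons_succ (ch : Char) (cs : List Char) (m : Nat) : pvNsp (ch :: cs) (m + 1) = pvNsp cs m := rfl

lemma pvB_bump_inner (r : List Char) :
    ∀ (k : Nat) (c : List Nat),
      ((PySem.List.enumerate r (k : Int)).foldl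
        (fun c p => if p.2 ≠ ' ' then c.set p.1.toNat (c.getD p.1.toNat 0 + 1) else c) c) = pvBump r k c := by
  induction r with
  | nil => intro k c; simp [PySem.List.enumerate_nil, pvBump]
  | cons ch cs ih =>
    intro k c
    rw [PySem.List.enumerate_cons, List.foldl_cons]
    have hcast : ((k : Int) + 1) = (((k + 1 : Nat)) : Int) := by push_cast; ring
    rw [hcast, ih]
    simp [pvBump]

lemma pvB_bump_eq (c : List Nat) (r : List Char) : pvB_bump c r = pvBump r 0 c := by
  unfold pvB_bump
  simpa using pvB_bump_inner r 0 c

lemma length_pvBump (r : List Char) : ∀ (k : Nat) (c : List Nat), (pvBump r k c).length = c.length := by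
  induction r with
  | nil => intro k c; rfl
  | cons ch cs ih =>
    intro k c
    rw [pvBump, ih]
    split_ifs <;> simp

lemma pvBump_getD (r : List Char) :
    ∀ (k : Nat) (c : List Nat), k + r.length ≤ c.length → ∀ q,
      (pvBump r k c).getD q 0 = c.getD q 0 + (if k ≤ q ∧ pvNsp r (q - k) then 1 else 0) := by
  induction r with
  | nil =>
    intro k c _ q
    simp [pvBump, pvNsp]
  | cons ch cs ih =>
    intro k c h q
    rw [pvBump]
    have hc'len : (if ch ≠ ' ' then c.set k (c.getD k 0 + 1) else c).length = c.length := by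
      split_ifs <;> simp
    rw [ih (k + 1) _ (by rw [hc'len]; simp at h; omega) q]
    by_cases hqk : q < k
    · have h1 : ¬ (k ≤ q ∧ pvNsp (ch :: cs) (q - k) = true) := by intro hcon; omega
      have h2 : ¬ (k + 1 ≤ q ∧ pvNsp cs (q - (k + 1)) = true) := by intro hcon; omega
      rw [if_neg h1, if_neg h2]
      split_ifs with hch
      · rw [pv_getD_set_ne c k q _ (by omega)]
      · rfl
    · by_cases hqe : q = k
      · subst hqe
        have h2 : ¬ (q + 1 ≤ q ∧ pvNsp cs (q - (q + 1)) = true) := by intro hcon; omega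
        rw [if_neg h2]
        have hsub : q - q = 0 := by omega
        have hnsp0 : pvNsp (ch :: cs) (q - q) = decide (ch ≠ ' ') := by rw [hsub]; rfl
        by_cases hch : ch = ' '
        · rw [if_neg (show ¬ (ch ≠ ' ') by simp [hch])]
          have hneg : ¬ (q ≤ q ∧ pvNsp (ch :: cs) (q - q) = true) := by
            intro hcon
            rw [hnsp0] at hcon
            simp [hch] at hcon
          rw [if_neg hneg]
        · rw [if_pos (show (ch ≠ ' ') from hch)]
          rw [pv_getD_set_eq c q _ (by simp at h; omega)]
          rw [if_pos ⟨le_refl q, by rw [hnsp0]; simpa using hch⟩]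
      · have hgt : k < q := by omega
        have hsub : q - k = (q - (k + 1)) + 1 := by omega
        rw [hsub, pvNsp_cons_succ]
        have hgd : (if ch ≠ ' ' then c.set k (c.getD k 0 + 1) else c).getD q 0 = c.getD q 0 := by
          split_ifs
          · rw [pv_getD_set_ne c k q _ (by omega)]
          · rfl
        rw [hgd]
        by_cases h2 : pvNsp cs (q - (k + 1)) = true
        · rw [if_pos ⟨by omega, h2⟩, if_pos ⟨by omega, h2⟩]
        · rw [if_neg (by intro hcon; exact h2 hcon.2), if_neg (by intro hcon; exact h2 hcon.2)]

lemma pvCnt_fold (rows : List (List Char)) :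
    ∀ (c : List Nat), (∀ r ∈ rows, r.length ≤ c.length) → ∀ q,
      (rows.foldl pvB_bump c).getD q 0 = c.getD q 0 + pvCnt rows q := by
  induction rows with
  | nil =>
    intro c _ q
    simp [pvCnt]
  | cons r rows' ih =>
    intro c hlen q
    rw [List.foldl_cons, pvB_bump_eq]
    have hblen : (pvBump r 0 c).length = c.length := length_pvBump r 0 c
    rw [ih (pvBump r 0 c) (by intro r' hr'; rw [hblen]; exact hlen r' (by simp [hr'])) q]
    rw [pvBump_getD r 0 c (by simpa using hlen r (by simp)) q]
    have hcnt : pvCnt (r :: rows') q = (if pvNsp r q = true then 1 else 0) + pvCnt rows' q := by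
      simp only [pvCnt, List.countP_cons]
      split_ifs <;> simp_all <;> omega
    rw [hcnt]
    have : (if 0 ≤ q ∧ pvNsp r (q - 0) = true then 1 else 0) = (if pvNsp r q = true then 1 else 0) := by
      have hq0 : q - 0 = q := by omega
      rw [hq0]
      split_ifs with h1 h2 <;> simp_all
    rw [this]
    split_ifs <;> omega

lemma pvScan_inner (sur : List Nat) (r : List Char) :
    ∀ (k : Nat) (st : List Nat × List Char),
      ((PySem.List.enumerate r (k : Int)).foldl
        (fun st p =>
          if p.2 ≠ ' ' then
            (st.1.set p.1.toNat (st.1.getD p.1.toNat 0 + 1),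
             if st.1.getD p.1.toNat 0 < sur.getD p.1.toNat 0 then st.2 ++ [p.2] else st.2)
          else st) st)
      = (pvBump r k st.1, st.2 ++ pvKept sur r k st.1) := by
  induction r with
  | nil =>
    intro k st
    simp [PySem.List.enumerate_nil, pvBump, pvKept]
  | cons ch cs ih =>
    intro k st
    obtain ⟨seen, out⟩ := st
    rw [PySem.List.enumerate_cons, List.foldl_cons]
    have hcast : ((k : Int) + 1) = (((k + 1 : Nat)) : Int) := by push_cast; ring
    rw [hcast]
    by_cases hch : ch = ' '
    · subst hch
      rw [if_neg (by simp)]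
      rw [ih (k + 1) (seen, out)]
      simp [pvBump, pvKept]
    · rw [if_pos (by simpa using hch)]
      simp only [Int.toNat_natCast]
      rw [ih (k + 1) _]
      simp only [pvBump, pvKept, if_pos hch]
      by_cases hlt : seen.getD k 0 < sur.getD k 0
      · rw [if_pos hlt, if_pos ⟨hch, hlt⟩]
        simp
      · rw [if_neg hlt, if_neg (by intro hcon; exact hlt hcon.2)]
        simp

lemma pvKept_congr (sur : List Nat) (r : List Char) :
    ∀ (k : Nat) (s1 s2 : List Nat), (∀ q, k ≤ q → s1.getD q 0 = s2.getD q 0) →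
      pvKept sur r k s1 = pvKept sur r k s2 := by
  induction r with
  | nil => intro k s1 s2 _; rfl
  | cons ch cs ih =>
    intro k s1 s2 hag
    rw [pvKept, pvKept, hag k (le_refl k)]
    congr 1
    apply ih (k + 1)
    intro q hq
    split_ifs
    · rw [pv_getD_set_ne s1 k q _ (by omega), pv_getD_set_ne s2 k q _ (by omega)]
      exact hag q (by omega)
    · exact hag q (by omega)

lemma pvKept_eq_pvKeep (sur : List Nat) (r : List Char) :
    ∀ (k : Nat) (seen : List Nat), pvKept sur r k seen = pvKeep sur seen r k := by
  induction r with
  | nil => intro k seen; rfl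
  | cons ch cs ih =>
    intro k seen
    rw [pvKept, pvKeep]
    congr 1
    by_cases hch : ch = ' '
    · subst hch
      rw [if_neg (by simp)]
      exact ih (k + 1) seen
    · rw [if_pos hch]
      rw [pvKept_congr sur cs (k + 1) _ seen (by intro q hq; exact pv_getD_set_ne seen k q _ (by omega))]
      exact ih (k + 1) seen

lemma pvScan_outer (sur : List Nat) (rows : List (List Char)) :
    ∀ (seen : List Nat) (out : List Char),
      (rows.foldl
        (fun (st : List Nat × List Char) r =>
          (PySem.List.enumerate r 0).foldl
            (fun st p =>
              if p.2 ≠ ' ' then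
                (st.1.set p.1.toNat (st.1.getD p.1.toNat 0 + 1),
                 if st.1.getD p.1.toNat 0 < sur.getD p.1.toNat 0 then st.2 ++ [p.2] else st.2)
              else st) st)
        (seen, out)).2
      = out ++ pvK sur rows seen := by
  induction rows with
  | nil => intro seen out; simp [pvK]
  | cons r rows' ih =>
    intro seen out
    rw [List.foldl_cons]
    have hin := pvScan_inner sur r 0 (seen, out)
    simp only [Nat.cast_zero] at hin
    rw [hin, ih]
    rw [pvK, pvKept_eq_pvKeep]
    simp

-- ---------- joining the two sides ----------

lemma pv_row_final (K : Nat) (nums2 : List Int) (rest : List (List Char)) (sur seen : List Nat) :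
    ∀ (r : List Char) (m : Nat),
      (∀ pos, (h : pos < r.length) → r[pos] ≠ ' ' →
        ((¬(m + pos < K ∧ (pvCnt rest (m + pos) : Int) < max 0 (nums2.getD (m + pos) 0))) ↔
          seen.getD (m + pos) 0 < sur.getD (m + pos) 0)) →
      (pvRowT K nums2 rest r m).filter (fun c => c ≠ ' ') = pvKeep sur seen r m := by
  intro r
  induction r with
  | nil => intro m _; rfl
  | cons ch cs ih =>
    intro m H
    rw [show pvRowT K nums2 rest (ch :: cs) m =
        (if m < K ∧ ch ≠ ' ' ∧ (pvCnt rest m : Int) < max 0 (nums2.getD m 0) then ' ' else ch) ::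
          pvRowT K nums2 rest cs (m + 1) from rfl]
    rw [pvKeep]
    have htail : (pvRowT K nums2 rest cs (m + 1)).filter (fun c => c ≠ ' ') = pvKeep sur seen cs (m + 1) := by
      apply ih
      intro pos hpos hch
      have := H (pos + 1) (by simpa using Nat.succ_lt_succ hpos) (by simpa using hch)
      have hadd : m + (pos + 1) = m + 1 + pos := by omega
      rw [hadd] at this
      exact this
    by_cases hch : ch = ' '
    · subst hch
      rw [if_neg (by intro hcon; exact hcon.2.1 rfl)]
      rw [List.filter_cons_of_neg (by simp)]
      rw [if_neg (by intro hcon; exact hcon.1 rfl)]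
      simpa using htail
    · have H0 := H 0 (by simp) (by simpa using hch)
      rw [Nat.add_zero] at H0
      by_cases hcond : m < K ∧ (pvCnt rest m : Int) < max 0 (nums2.getD m 0)
      · rw [if_pos ⟨hcond.1, hch, hcond.2⟩]
        rw [List.filter_cons_of_neg (by simp)]
        have hB : ¬ (seen.getD m 0 < sur.getD m 0) := by
          intro hB
          exact (H0.mpr hB) hcond
        rw [if_neg (by intro hcon; exact hB hcon.2)]
        simpa using htail
      · rw [if_neg (by intro hcon; exact hcond ⟨hcon.1, hcon.2.2⟩)]
        rw [List.filter_cons_of_pos (by simpa using hch)]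
        rw [if_pos ⟨hch, H0.mp hcond⟩]
        rw [htail]
        rfl

lemma pv_final (K maxlen : Nat) (nums2 : List Int) (sur : List Nat) (total : Nat → Nat)
    (hsur : ∀ q, q < maxlen →
      sur.getD q 0 = if q < K then total q - min (total q) (max 0 (nums2.getD q 0)).toNat else total q) :
    ∀ (rest : List (List Char)) (seen : List Nat),
      (∀ r ∈ rest, r.length ≤ maxlen) → seen.length = maxlen →
      (∀ q, seen.getD q 0 + pvCnt rest q = total q) →
      (pvRef K nums2 rest).flatMap (fun line => line.filter (fun c => c ≠ ' ')) = pvK sur rest seen := by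
  intro rest
  induction rest with
  | nil => intro seen _ _ _; rfl
  | cons r rest' ih =>
    intro seen hlen hslen hseen
    rw [show pvRef K nums2 (r :: rest') = pvRowT K nums2 rest' r 0 :: pvRef K nums2 rest' from rfl]
    rw [List.flatMap_cons, pvK]
    have hrmax : r.length ≤ maxlen := hlen r (by simp)
    congr 1
    · apply pv_row_final
      intro pos hpos hch
      have hqmax : pos < maxlen := by omega
      have hnsp : pvNsp r pos = true := by
        simp only [pvNsp, List.getD_eq_getElem?_getD, List.getElem?_eq_getElem hpos,
          Option.getD_some, decide_eq_true_iff]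
        simpa using hch
      have htot := hseen pos
      have hcnt : pvCnt (r :: rest') pos = pvCnt rest' pos + 1 := by
        simp [pvCnt, List.countP_cons, hnsp]
      rw [hcnt] at htot
      simp only [Nat.zero_add]
      rw [hsur pos hqmax]
      by_cases hpk : pos < K
      · rw [if_pos hpk]
        omega
      · rw [if_neg hpk]
        omega
    · apply ih
      · intro r' hr'
        exact hlen r' (by simp [hr'])
      · rw [length_pvBump]
        exact hslen
      · intro q
        have hb := pvBump_getD r 0 seen (by omega) q
        have hq0 : q - 0 = q := by omega
        rw [hq0] at hb
        have hcnt : pvCnt (r :: rest') q = pvCnt rest' q + (if pvNsp r q = true then 1 else 0) := by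
          simp only [pvCnt, List.countP_cons]
        have := hseen q
        rw [hcnt] at this
        rw [hb]
        split_ifs at * <;> simp_all <;> omega


-- ===== VERDICT (by name: the statement is the Claim_ definition above) =====
theorem last_survivors_spec : Claim_equal_last_survivors := by
  intro arr nums _hdom hpre
  obtain ⟨hne, hcols⟩ := hpre
  unfold Spec_last_survivors last_survivors last_survivors_alt
  dsimp only
  -- names used below (all definitionally the expressions appearing in the goal)
  have hKL : (nums.take (arr.headD "").toList.length).length =
      min nums.length (arr.headD "").toList.length := by
    rw [List.length_take, Nat.min_comm]
  -- A side: the outer column loop produces the reference matrix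
  have hs : ∀ k, k < (nums.take (arr.headD "").toList.length).length →
      (nums.take (arr.headD "").toList.length).getD k 0 > 0 →
      ∀ j, (hj : j < (arr.map String.toList).length) → (arr.map String.toList)[j].length ≤ k →
        (nums.take (arr.headD "").toList.length).getD k 0 ≤
          (pvCnt ((arr.map String.toList).drop (j + 1)) k : Int) := by
    intro k hk hkpos j hj hshort
    have hkw : k < min nums.length (arr.headD "").toList.length := by omega
    have hgd : (nums.take (arr.headD "").toList.length).getD k 0 = nums.getD k 0 := by
      rw [List.getD_eq_getElem?_getD, List.getD_eq_getElem?_getD,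
        List.getElem?_take_of_lt (by omega)]
    have hj' : j < arr.length := by simpa using hj
    have harrj : (arr.getD j "").toList.length ≤ k := by
      have hjm : (arr.map String.toList)[j] = arr[j].toList := by
        simp
      rw [hjm] at hshort
      rw [List.getD_eq_getElem?_getD, List.getElem?_eq_getElem hj']
      simpa using hshort
    have hcol := hcols k hkw (by rw [← hgd]; exact hkpos) j hj' harrj
    have hcc : pvCnt ((arr.map String.toList).drop (j + 1)) k = pvColCnt (arr.drop (j + 1)) k := by
      rw [← List.map_drop]
      simp only [pvCnt, pvColCnt, List.countP_map]
      rfl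
    rw [hgd, hcc]
    exact hcol
  rw [pvA_fold (arr.map String.toList) (nums.take (arr.headD "").toList.length) hs
      (nums.take (arr.headD "").toList.length).length (le_refl _)]
  rw [PySem.List.foldl_append_eq_flatMap, List.nil_append]
  rw [pvScan_outer _ (arr.map String.toList)
      (List.replicate ((arr.map String.toList).foldl (fun m r => max m r.length) 0) 0) []]
  rw [List.nil_append]
  congr 1
  have hlenrows : ∀ r ∈ arr.map String.toList, r.length ≤
      (arr.map String.toList).foldl (fun m r => max m r.length) 0 := by
    intro r hr
    exact (PySem.List.le_foldl_max_nat (arr.map String.toList) (fun r => r.length) 0).2 r hr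
  apply pv_final
  · -- hsur
    intro q hq
    have hgetD : ((List.range ((arr.map String.toList).foldl (fun m r => max m r.length) 0)).map
        (fun i =>
          if i < min nums.length (arr.headD "").toList.length then
            ((arr.map String.toList).foldl pvB_bump
                (List.replicate ((arr.map String.toList).foldl (fun m r => max m r.length) 0) 0)).getD i 0 -
              min (((arr.map String.toList).foldl pvB_bump
                (List.replicate ((arr.map String.toList).foldl (fun m r => max m r.length) 0) 0)).getD i 0)
                (max 0 (nums.getD i 0)).toNat
          else ((arr.map String.toList).foldl pvB_bump
            (List.replicate ((arr.map String.toList).foldl (fun m r => max m r.length) 0) 0)).getD i 0)).getD q 0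
        = (if q < min nums.length (arr.headD "").toList.length then
            ((arr.map String.toList).foldl pvB_bump
                (List.replicate ((arr.map String.toList).foldl (fun m r => max m r.length) 0) 0)).getD q 0 -
              min (((arr.map String.toList).foldl pvB_bump
                (List.replicate ((arr.map String.toList).foldl (fun m r => max m r.length) 0) 0)).getD q 0)
                (max 0 (nums.getD q 0)).toNat
          else ((arr.map String.toList).foldl pvB_bump
            (List.replicate ((arr.map String.toList).foldl (fun m r => max m r.length) 0) 0)).getD q 0) := by
      rw [List.getD_eq_getElem?_getD, List.getElem?_map, List.getElem?_range hq]
      rfl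
    rw [hgetD]
    have hcnt : ((arr.map String.toList).foldl pvB_bump
        (List.replicate ((arr.map String.toList).foldl (fun m r => max m r.length) 0) 0)).getD q 0
        = pvCnt (arr.map String.toList) q := by
      rw [pvCnt_fold (arr.map String.toList) _ (by simpa using hlenrows) q]
      have : (List.replicate ((arr.map String.toList).foldl (fun m r => max m r.length) 0) (0 : Nat)).getD q 0 = 0 := by
        rw [List.getD_eq_getElem?_getD, List.getElem?_replicate]
        split_ifs <;> rfl
      rw [this]
      omega
    rw [hcnt]
    have hgdtake : ∀ hqK : q < (nums.take (arr.headD "").toList.length).length,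
        (nums.take (arr.headD "").toList.length).getD q 0 = nums.getD q 0 := by
      intro hqK
      rw [List.getD_eq_getElem?_getD, List.getD_eq_getElem?_getD,
        List.getElem?_take_of_lt (by omega)]
    by_cases hqK : q < (nums.take (arr.headD "").toList.length).length
    · rw [if_pos hqK, if_pos (by omega), hgdtake hqK]
    · rw [if_neg hqK, if_neg (by omega)]
  · -- row lengths
    exact hlenrows
  · -- seen length
    simp
  · -- seen invariant
    intro q
    have : (List.replicate ((arr.map String.toList).foldl (fun m r => max m r.length) 0) (0 : Nat)).getD q 0 = 0 := by
      rw [List.getD_eq_getElem?_getD, List.getElem?_replicate]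
      split_ifs <;> rfl
    rw [this]
    omega
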